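-- pv_equiv track=rewrite | github.com/pypi-data/pypi-mirror-395 | packages/nzmath/nzmath-3.0.3.tar.gz/nzmath-3.0.3/src/nzmath/residue.py | primitiveRoot0PW
-- ===== SOURCE A (Python) =====
-- def primitiveRoot0PW(p, r):
--     """
--     Input
--         p: odd prime
--         r: primitive root modulo  p
--     Output
--         PW = [r**I%p for I in range(p-1)]: numeric list of powers
--     """
--     if p < 5: return [1, 2]
--     q = p>>1; PW = [1, r] + [-1]*(q-2); x = r
--     for i in range(2,q):
--         x = x*r%p; PW[i] = x
--     PW = PW + [p-1, p-r]
--     for i in range(2,p>>1): PW.append(p - PW[i])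
--     return PW
-- ===== SOURCE B (Python) =====
-- def primitiveRoot0PW(p, r):
--     """Same result as A: half the powers via modular exponentiation, then the
--     whole second half as a pointwise reflection p - v of the first half."""
--     if p < 5:
--         return [1, 2]
--     half = [1, r] + [pow(r, i, p) for i in range(2, p >> 1)]
--     return half + [p - v for v in half]
-- ===== Notes on version B (the rewrite author's own statement) =====
-- stated objective: simpler
-- what changed: Replaces A's preallocate-then-mutate running-product loop and its second index-reading append loop by a comprehension of per-index modular exponentiations pow(r,i,p) plus a single pointwise reflection map p-v over the whole first half.
import Mathlib
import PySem

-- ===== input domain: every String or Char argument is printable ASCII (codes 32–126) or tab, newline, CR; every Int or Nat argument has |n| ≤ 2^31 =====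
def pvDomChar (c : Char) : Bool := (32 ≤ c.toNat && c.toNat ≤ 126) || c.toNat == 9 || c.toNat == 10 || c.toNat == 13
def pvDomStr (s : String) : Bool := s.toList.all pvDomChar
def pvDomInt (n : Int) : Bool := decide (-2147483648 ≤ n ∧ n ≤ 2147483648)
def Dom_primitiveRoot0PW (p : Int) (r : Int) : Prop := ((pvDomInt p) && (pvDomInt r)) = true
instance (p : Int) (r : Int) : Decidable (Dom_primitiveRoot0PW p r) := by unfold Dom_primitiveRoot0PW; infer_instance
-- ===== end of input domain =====

-- B computes the first half by per-index modular exponentiation and the second half as a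
-- pointwise reflection p - v of the whole first half; same values as A, no mutation loops.

-- ===== PORT A =====
-- literal port of A; p>>1 is floor division by 2; PW[i] = x / PW[i] use pySetD / pyGetD
-- (both indices are always in range here, so the total forms' defaults are never taken)
def primitiveRoot0PW (p : Int) (r : Int) : List Int :=
  if p < 5 then [1, 2] else
  let q := PySem.Int.floordiv p 2
  let PW0 : List Int := [1, r] ++ List.replicate (q - 2).toNat (-1)
  let st := (PySem.List.pyRange 2 q 1).foldl
      (fun (st : List Int × Int) i =>
        let x := PySem.Int.mod (st.2 * r) p
        (PySem.List.pySetD st.1 i x, x)) (PW0, r)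
  let PW1 := st.1 ++ [p - 1, p - r]
  (PySem.List.pyRange 2 (PySem.Int.floordiv p 2) 1).foldl
      (fun PW i => PW ++ [p - PySem.List.pyGetD PW i 0]) PW1

-- ===== PORT B =====
-- literal port of Source B; pow(r, i, p) is PySem.Int.powMod (exponent i ≥ 0 comes from the range)
def primitiveRoot0PW_alt (p : Int) (r : Int) : List Int :=
  if p < 5 then [1, 2] else
  let half : List Int :=
    [1, r] ++ (PySem.List.pyRange 2 (PySem.Int.floordiv p 2) 1).map
      (fun i => PySem.Int.powMod r i.toNat p)
  half ++ half.map (fun v => p - v)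

-- ===== PRECONDITION & SPEC =====
def Spec_primitiveRoot0PW (p : Int) (r : Int) (out : List Int) : Prop := out = primitiveRoot0PW_alt p r
instance (p : Int) (r : Int) (out : List Int) : Decidable (Spec_primitiveRoot0PW p r out) := by unfold Spec_primitiveRoot0PW; infer_instance

-- ===== CLAIM (what is proved, stated in full; the proofs are below) =====
def Claim_equal_primitiveRoot0PW : Prop := ∀ (p : Int) (r : Int), Dom_primitiveRoot0PW p r → Spec_primitiveRoot0PW p r (primitiveRoot0PW p r)

-- ===== LEMMAS AND PROOFS =====

-- A's first loop: after m steps the set-loop has filled positions 2..m+1 with r^(k+2) mod p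
-- and the accumulator holds r^(m+1) mod p (still the raw r when no step has run).
lemma phase1 (p r : Int) (hp : 0 < p) (n : ℕ) :
    ∀ m : ℕ, m ≤ n →
    (List.range m).foldl (fun (st : List Int × Int) (k : ℕ) =>
        (PySem.List.pySetD st.1 (2 + (k : Int)) (PySem.Int.mod (st.2 * r) p),
         PySem.Int.mod (st.2 * r) p))
      (([1, r] ++ List.replicate n (-1) : List Int), r)
    = ([1, r] ++ (List.range m).map (fun k => PySem.Int.mod (r ^ (k + 2)) p)
        ++ List.replicate (n - m) (-1),
       if m = 0 then r else PySem.Int.mod (r ^ (m + 1)) p) := by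
  intro m
  induction m with
  | zero => intro _; simp
  | succ m ih =>
    intro hm
    rw [List.range_succ, List.foldl_append, ih (by omega)]
    simp only [List.foldl_cons, List.foldl_nil]
    have hx : PySem.Int.mod ((if m = 0 then r else PySem.Int.mod (r ^ (m + 1)) p) * r) p
        = PySem.Int.mod (r ^ (m + 2)) p := by
      rcases Nat.eq_zero_or_pos m with h0 | h0
      · subst h0; norm_num; ring_nf
      · rw [if_neg (by omega)]
        simp only [PySem.Int.mod_eq_emod_of_pos hp]
        rw [Int.mul_emod, Int.emod_emod, ← Int.mul_emod, ← pow_succ]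
    rw [hx, PySem.List.pySetD_of_nonneg _ _ (by positivity),
        show ((2 : Int) + (m : Int)).toNat = 2 + m from by omega]
    refine Prod.ext ?_ (by simp)
    show ([1, r] ++ (List.range m).map (fun k => PySem.Int.mod (r ^ (k + 2)) p)
          ++ List.replicate (n - m) (-1)).set (2 + m) (PySem.Int.mod (r ^ (m + 2)) p) = _
    have hlen : (([1, r] : List Int) ++ (List.range m).map
        (fun k => PySem.Int.mod (r ^ (k + 2)) p)).length = 2 + m := by simp; omega
    rw [List.set_append_right _ _ hlen.le, hlen, Nat.sub_self,
        show n - m = (n - (m + 1)) + 1 from by omega, List.replicate_succ, List.set_cons_zero,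
        List.map_append]
    simp [List.append_assoc]

-- A's second loop only reads positions inside the original list, so the appended tail is a map.
lemma phase2 (p : Int) (L : List Int) (n : ℕ) (hn : n + 2 ≤ L.length) :
    (List.range n).foldl (fun (PW : List Int) (k : ℕ) => PW ++ [p - PySem.List.pyGetD PW (2 + (k : Int)) 0]) L
    = L ++ (List.range n).map (fun (k : ℕ) => p - PySem.List.pyGetD L (2 + (k : Int)) 0) := by
  induction n with
  | zero => simp
  | succ n ih =>
    rw [List.range_succ, List.foldl_append, ih (by omega)]
    simp only [List.foldl_cons, List.foldl_nil, List.map_append, List.map_cons, List.map_nil]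
    rw [List.append_assoc]
    congr 2
    have h2 : (2 : Int) + (n : Int) = ((n + 2 : ℕ) : Int) := by push_cast; ring
    rw [h2, PySem.List.pyGetD_natCast, PySem.List.pyGetD_natCast]
    rw [List.getD_append _ _ _ _ (by omega)]

lemma ports_agree (p r : Int) : primitiveRoot0PW p r = primitiveRoot0PW_alt p r := by
  unfold primitiveRoot0PW primitiveRoot0PW_alt
  by_cases h5 : p < 5
  · simp [h5]
  · simp only [if_neg h5]
    have hp : 0 < p := by omega
    have hqd : PySem.Int.floordiv p 2 = p / 2 := PySem.Int.floordiv_eq_ediv_of_pos (by norm_num)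
    obtain ⟨n, hn⟩ : ∃ n : ℕ, PySem.Int.floordiv p 2 = 2 + (n : Int) :=
      ⟨(PySem.Int.floordiv p 2 - 2).toNat, by rw [hqd]; omega⟩
    have htn : (PySem.Int.floordiv p 2 - 2).toNat = n := by rw [hn]; omega
    have hr : PySem.List.pyRange 2 (PySem.Int.floordiv p 2) 1
        = (List.range n).map (fun (k : ℕ) => 2 + (k : Int)) := by
      rw [PySem.List.pyRange_one, htn]
    rw [hr, htn, List.foldl_map, List.foldl_map, List.map_map]
    rw [phase1 p r hp n n le_rfl]
    have hpow : ((fun i => PySem.Int.powMod r i.toNat p) ∘ fun (k : ℕ) => 2 + (k : Int))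
        = (fun (k : ℕ) => PySem.Int.mod (r ^ (k + 2)) p) := by
      funext k
      simp only [Function.comp, PySem.Int.powMod]
      rw [show ((2:Int) + (k:Int)).toNat = k + 2 from by omega]
    rw [hpow]
    set M : List Int := (List.range n).map (fun k => PySem.Int.mod (r ^ (k + 2)) p) with hM
    have hML : M.length = n := by simp [hM]
    rw [phase2 p _ n (by simp [hML])]
    simp only [Nat.sub_self, List.replicate_zero, List.append_nil]
    have hget : ∀ k < n,
        p - PySem.List.pyGetD (([1, r] ++ M : List Int) ++ [p - 1, p - r]) (2 + (k : Int)) 0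
        = p - PySem.Int.mod (r ^ (k + 2)) p := by
      intro k hk
      congr 1
      rw [show (2:Int) + (k:Int) = ((k + 2 : ℕ) : Int) from by push_cast; ring,
          PySem.List.pyGetD_natCast, List.getD_eq_getElem?_getD,
          List.getElem?_append_left (by simp [hML]; omega),
          List.getElem?_append_right (by simp)]
      simp only [hM, List.length_cons]
      rw [List.getElem?_map, List.getElem?_range (by simpa using hk)]
      rfl
    rw [List.map_congr_left (fun k hk => hget k (List.mem_range.mp hk))]
    simp [hM, List.map_map]

-- ===== VERDICT (by name: the statement is the Claim_ definition above) =====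
theorem primitiveRoot0PW_spec : Claim_equal_primitiveRoot0PW := by
  intro p r _
  unfold Spec_primitiveRoot0PW
  exact ports_agree p r
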